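-- pv_equiv track=rewrite | github.com/Fransandi/Advent-of-Code-Python-Solutions | 2023/solutions/day13.py | part_one
-- ===== SOURCE A (Python) =====
-- ROW = 'ROW'
--
-- COL = 'COL'
--
-- def part_one(input):
--     grids = parse_input(input)
--     total = 0
--     for grid in grids:
--         type, reflection = solve(grid)
--         if type == COL:
--             total += 100 * reflection
--         elif type == ROW:
--             total += reflection
--     return total
--
-- def parse_input(input):
--     current, patterns = [], []
--     for line in input:
--         if line.strip():
--             current.append(line.strip())
--         else:
--             patterns.append(current)
--             current = []
--     patterns.append(current)
--     return patterns
--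
-- def solve(grid, prev_answer=(None, 0)):
--     # Check for reflection
--     reflection = find_reflection(
--         grid, prev_answer[1] if prev_answer[0] == COL else None)
--     if reflection:
--         return COL, reflection
--     else:
--         # Rotate matrix and check again
--         reflection = find_reflection(rotate_matrix(
--             grid), prev_answer[1] if prev_answer[0] == ROW else None)
--         if reflection:
--             return ROW, reflection
--     return None, 0
--
-- def find_reflection(grid, prev_answer=None):
--     for i in range(len(grid)-1):
--         if grid[i] == grid[i + 1] and (prev_answer == None or i+1 != prev_answer):
--             is_valid = validate_reflection(grid, i)
--             if is_valid:
--                 return i + 1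
--     return 0
--
-- def validate_reflection(grid, start):
--     rows = min(start+1, len(grid)-start-1)
--     for i in range(0, rows):
--         if (grid[start-i] != grid[start+1+i]):
--             return False
--     return True
--
-- def rotate_matrix(matrix):
--     transposed_matrix = list(map(list, zip(*matrix)))
--     rotated_matrix = ["".join(row[::-1]) for row in transposed_matrix]
--     return rotated_matrix
-- ===== SOURCE B (Python) =====
-- def part_one(input):
--     # Single streaming pass: score each grid at its terminating blank line.
--     total, grid = 0, []
--     for line in input:
--         s = line.strip()
--         if s:
--             grid.append(s)
--         else:
--             total += _score(grid)
--             grid = []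
--     return total + _score(grid)
--
--
-- def _pal(same, lo, hi):
--     # the segment [lo, hi) is a palindrome, checked from the outside in
--     while lo < hi - 1:
--         if not same(lo, hi - 1):
--             return False
--         lo, hi = lo + 1, hi - 1
--     return True
--
--
-- def _line(n, same):
--     # A reflection line after position i exists iff the prefix of length 2*i
--     # or the suffix of length 2*(n-i) is an even-length palindrome; return the
--     # first such i, else 0.
--     for i in range(1, n):
--         if (2 * i <= n and _pal(same, 0, 2 * i)) or \
--            (n <= 2 * i and _pal(same, 2 * i - n, n)):
--             return i
--     return 0
--
--
-- def _score(g):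
--     r = _line(len(g), lambda a, b: g[a] == g[b])
--     if r:
--         return 100 * r
--     w = min(map(len, g), default=0)
--     return _line(w, lambda a, b: all(row[a] == row[b] for row in g))
-- ===== Notes on version B (the rewrite author's own statement) =====
-- stated objective: alternative
-- what changed: B streams the lines in one pass (scoring each grid at its terminating blank line instead of building a pattern list) and finds the reflection line via a different characterisation: the first i whose length-2i prefix or length-2(n-i) suffix is an even palindrome, tested outside-in by one higher-order palindrome scanner that is reused for columns through an index-equality callback, so A's adjacent-pair prescan, separate validation pass, prev_answer machinery and matrix rotation all disappear.
import Mathlib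
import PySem

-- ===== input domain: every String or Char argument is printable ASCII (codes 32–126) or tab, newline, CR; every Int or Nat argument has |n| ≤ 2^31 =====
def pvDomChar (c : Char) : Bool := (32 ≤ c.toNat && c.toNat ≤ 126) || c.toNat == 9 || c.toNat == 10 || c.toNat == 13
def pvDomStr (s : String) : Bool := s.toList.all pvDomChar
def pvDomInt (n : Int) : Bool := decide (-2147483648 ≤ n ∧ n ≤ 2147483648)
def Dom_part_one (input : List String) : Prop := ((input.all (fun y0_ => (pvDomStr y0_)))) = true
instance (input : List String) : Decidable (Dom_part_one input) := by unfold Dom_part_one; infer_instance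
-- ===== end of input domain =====

-- B streams the lines once and scores each grid by the palindromic prefix/suffix
-- characterisation of reflection lines, checked outside-in by one higher-order
-- scanner reused row- and column-wise (no transpose): a different decomposition.


-- ===== PORT A =====
-- parse_input: fold over the lines keeping (current, patterns); append current at the end
def parse_step (st : List String × List (List String)) (line : String) : List String × List (List String) :=
  let s := PySem.Str.strip line
  if s ≠ "" then (st.1 ++ [s], st.2) else ([], st.2 ++ [st.1])

def parse_input (input : List String) : List (List String) :=
  let st := input.foldl parse_step ([], [])
  st.2 ++ [st.1]

-- validate_reflection: the for-loop with early `return False` is the bounded `all`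
def validate_reflection (grid : List String) (start : Nat) : Bool :=
  let rows := min (start + 1) (grid.length - start - 1)
  (List.range rows).all (fun i => grid.getD (start - i) "" == grid.getD (start + 1 + i) "")

-- find_reflection's for-loop with early `return i+1`, as recursion on the loop index
def frGo (grid : List String) (prev : Option Int) (i : Nat) : Int :=
  if i < grid.length - 1 then
    if (grid.getD i "" == grid.getD (i + 1) "") &&
       (match prev with | none => true | some p => decide ((i : Int) + 1 ≠ p)) then
      if validate_reflection grid i then (i : Int) + 1 else frGo grid prev (i + 1)
    else frGo grid prev (i + 1)
  else 0
termination_by grid.length - 1 - i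

def find_reflection (grid : List String) (prev : Option Int) : Int := frGo grid prev 0

-- zip(*matrix): truncating transpose (columns up to the shortest row), as Python's zip
def minWidth : List String → Nat
  | [] => 0
  | s :: rest => rest.foldl (fun m t => min m t.toList.length) s.toList.length

def colAt (g : List String) (j : Nat) : List Char := g.map (fun s => s.toList.getD j ' ')

def pyZipT (g : List String) : List (List Char) := (List.range (minWidth g)).map (colAt g)

def rotate_matrix (matrix : List String) : List String :=
  (pyZipT matrix).map (fun row => String.ofList row.reverse)

def solve (grid : List String) (prevT : Option String) (prevR : Int) : Option String × Int :=
  let r := find_reflection grid (if prevT == some "COL" then some prevR else none)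
  if r ≠ 0 then (some "COL", r)
  else
    let r2 := find_reflection (rotate_matrix grid) (if prevT == some "ROW" then some prevR else none)
    if r2 ≠ 0 then (some "ROW", r2) else (none, 0)

def part_one (input : List String) : Int :=
  (parse_input input).foldl
    (fun total grid =>
      let tr := solve grid none 0
      if tr.1 == some "COL" then total + 100 * tr.2
      else if tr.1 == some "ROW" then total + tr.2
      else total) 0

-- ===== PORT B =====
-- _pal(same, lo, hi): the segment [lo, hi) is a palindrome, checked outside-in
def palGo (same : Nat → Nat → Bool) (lo hi : Nat) : Bool :=
  if lo < hi - 1 then (if same lo (hi - 1) then palGo same (lo + 1) (hi - 1) else false) else true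
termination_by hi - lo

-- _line(n, same): first i in 1..n-1 whose length-2i prefix or length-2(n-i) suffix
-- is an even palindrome, else 0
def lineGo (n : Nat) (same : Nat → Nat → Bool) (i : Nat) : Nat :=
  if i < n then
    if (decide (2 * i ≤ n) && palGo same 0 (2 * i)) ||
       (decide (n ≤ 2 * i) && palGo same (2 * i - n) n) then i
    else lineGo n same (i + 1)
  else 0
termination_by n - i

-- lambda a, b: g[a] == g[b]
def sameRow (g : List String) (a b : Nat) : Bool := g.getD a "" == g.getD b ""

-- lambda a, b: all(row[a] == row[b] for row in g)
def sameCol (g : List String) (a b : Nat) : Bool :=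
  g.all (fun row => row.toList.getD a ' ' == row.toList.getD b ' ')

-- min(map(len, g), default=0)
def widthB : List String → Nat
  | [] => 0
  | s :: rest => rest.foldl (fun m t => min m t.toList.length) s.toList.length

def scoreB (g : List String) : Int :=
  let r := lineGo g.length (sameRow g) 1
  if r ≠ 0 then 100 * (r : Int)
  else ((lineGo (widthB g) (sameCol g) 1 : Nat) : Int)

def part_one_alt (input : List String) : Int :=
  let st := input.foldl
    (fun (st : List String × Int) line =>
      let s := PySem.Str.strip line
      if s ≠ "" then (st.1 ++ [s], st.2) else ([], st.2 + scoreB st.1)) ([], 0)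
  st.2 + scoreB st.1

-- ===== PRECONDITION & SPEC =====
def Spec_part_one (input : List String) (out : Int) : Prop := out = part_one_alt input
instance (input : List String) (out : Int) : Decidable (Spec_part_one input out) := by unfold Spec_part_one; infer_instance

-- ===== CLAIM (what is proved, stated in full; the proofs are below) =====
def Claim_equal_part_one : Prop := ∀ (input : List String), Dom_part_one input → Spec_part_one input (part_one input)

-- ===== LEMMAS AND PROOFS =====

-- generic: congruence for List.all
theorem pvAllCongr {α : Type} (l : List α) (f g : α → Bool)
    (h : ∀ x ∈ l, f x = g x) : l.all f = l.all g := by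
  induction l with
  | nil => rfl
  | cons a l ih => simp only [List.all_cons, h a (by simp), ih (fun x hx => h x (by simp [hx]))]

-- generic: beq of two maps over the same list is the pointwise all
theorem pvMapBeq {α β : Type} [DecidableEq β] (l : List α) (f h : α → β) :
    ((l.map f) == (l.map h)) = l.all (fun x => f x == h x) := by
  induction l with
  | nil => rfl
  | cons a l ih => simp only [List.map_cons, List.all_cons, List.cons_beq_cons, ih]

-- getD through map, index in range
theorem pvGetDMap {α β : Type} (l : List α) (f : α → β) (j : Nat) (h : j < l.length) (d : β) :
    (l.map f).getD j d = f (l[j]) := by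
  rw [List.getD_eq_getElem _ _ (by simpa using h)]; simp

-- String.ofList is injective on the BEq level
theorem pvOfListBeq (a b : List Char) : (String.ofList a == String.ofList b) = (a == b) := by
  by_cases h : a = b
  · subst h; simp
  · have hne : String.ofList a ≠ String.ofList b := fun he => h (by
      have := congrArg String.toList he; simpa using this)
    rw [beq_eq_false_iff_ne.mpr hne, beq_eq_false_iff_ne.mpr h]

-- list reverse is injective on the BEq level
theorem pvRevBeq {α : Type} [DecidableEq α] (a b : List α) : (a.reverse == b.reverse) = (a == b) := by
  by_cases h : a = b
  · subst h; simp
  · have hne : a.reverse ≠ b.reverse := fun he => h (List.reverse_inj.mp he)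
    rw [beq_eq_false_iff_ne.mpr hne, beq_eq_false_iff_ne.mpr h]

theorem pvRangeRev (m : Nat) : (List.range m).reverse = (List.range m).map (fun i => m - 1 - i) := by
  rw [List.range_eq_range', List.reverse_range']
  simp
  rw [List.range_eq_range']

-- an `all` over a range may be read back to front
theorem pvAllRangeRev (m : Nat) (f : Nat → Bool) :
    (List.range m).all f = (List.range m).all (fun k => f (m - 1 - k)) := by
  conv_lhs => rw [← List.all_reverse]
  rw [pvRangeRev, List.all_map]
  rfl

-- the outside-in palindrome loop is the `all` over its mirrored index pairs
theorem palGo_all (same : Nat → Nat → Bool) (fuel : Nat) : ∀ lo hi, hi - lo ≤ fuel →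
    palGo same lo hi = (List.range ((hi - lo) / 2)).all (fun k => same (lo + k) (hi - 1 - k)) := by
  induction fuel with
  | zero =>
    intro lo hi h
    rw [palGo, if_neg (by omega), show (hi - lo) / 2 = 0 by omega]
    simp
  | succ fuel ih =>
    intro lo hi h
    rw [palGo]
    by_cases hlt : lo < hi - 1
    · rw [if_pos hlt, ih (lo + 1) (hi - 1) (by omega)]
      rw [show (hi - lo) / 2 = ((hi - 1) - (lo + 1)) / 2 + 1 by omega, List.range_succ_eq_map]
      simp only [List.all_cons, List.all_map]
      cases hsame : same lo (hi - 1) with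
      | false => simp
      | true =>
        rw [if_pos rfl]
        simp only [Bool.true_and]
        apply pvAllCongr
        intro k _
        rw [show lo + 1 + k = lo + (k + 1) by omega, show hi - 1 - 1 - k = hi - 1 - (k + 1) by omega]
        rfl
    · rw [if_neg hlt, show (hi - lo) / 2 = 0 by omega]
      simp

-- B's prefix/suffix palindrome guard at i is A's validate_reflection at i-1
theorem guard_eq (G : List String) (same : Nat → Nat → Bool)
    (hsame : ∀ a b, a < G.length → b < G.length → same a b = (G.getD a "" == G.getD b ""))
    (i : Nat) (h1 : 1 ≤ i) (h2 : i < G.length) :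
    ((decide (2 * i ≤ G.length) && palGo same 0 (2 * i)) ||
     (decide (G.length ≤ 2 * i) && palGo same (2 * i - G.length) G.length)) =
    validate_reflection G (i - 1) := by
  unfold validate_reflection
  rw [show min (i - 1 + 1) (G.length - (i - 1) - 1) = min i (G.length - i) by omega]
  have hval : ∀ lo m, lo + 2 * m ≤ G.length → lo + m = i →
      palGo same lo (lo + 2 * m) =
      (List.range m).all (fun k => G.getD (i - 1 - k) "" == G.getD (i - 1 + 1 + k) "") := by
    intro lo m hle hi
    rw [palGo_all same (lo + 2 * m - lo) lo (lo + 2 * m) (le_refl _),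
        show (lo + 2 * m - lo) / 2 = m by omega]
    rw [pvAllRangeRev]
    apply pvAllCongr
    intro k hk
    have hkm : k < m := List.mem_range.mp hk
    rw [hsame (lo + (m - 1 - k)) (lo + 2 * m - 1 - (m - 1 - k)) (by omega) (by omega)]
    rw [show lo + (m - 1 - k) = i - 1 - k by omega,
        show lo + 2 * m - 1 - (m - 1 - k) = i - 1 + 1 + k by omega]
  rcases Nat.lt_trichotomy (2 * i) G.length with hc | hc | hc
  · rw [decide_eq_true (by omega : 2 * i ≤ G.length),
        decide_eq_false (by omega : ¬ G.length ≤ 2 * i)]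
    simp only [Bool.true_and, Bool.false_and, Bool.or_false]
    have := hval 0 i (by omega) (by omega)
    simp only [Nat.zero_add] at this
    rw [this, show min i (G.length - i) = i by omega]
  · rw [decide_eq_true (by omega : 2 * i ≤ G.length),
        decide_eq_true (by omega : G.length ≤ 2 * i)]
    simp only [Bool.true_and]
    rw [show 2 * i - G.length = 0 by omega, hc, Bool.or_self]
    have := hval 0 i (by omega) (by omega)
    simp only [Nat.zero_add] at this
    rw [hc] at this
    rw [this, show min i (G.length - i) = i by omega]
  · rw [decide_eq_false (by omega : ¬ 2 * i ≤ G.length),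
        decide_eq_true (by omega : G.length ≤ 2 * i)]
    simp only [Bool.true_and, Bool.false_and, Bool.false_or]
    have := hval (2 * i - G.length) (G.length - i) (by omega) (by omega)
    rw [show 2 * i - G.length + 2 * (G.length - i) = G.length by omega] at this
    rw [this, show min i (G.length - i) = G.length - i by omega]

-- A-side scan expressed with validate_reflection only (proof-side helper)
def vScan (g : List String) (i : Nat) : Option Nat :=
  if i < g.length then (if validate_reflection g (i - 1) then some i else vScan g (i + 1)) else none
termination_by g.length - i

-- the k = 0 comparison of validate_reflection is the adjacency test
theorem validate_first (g : List String) (s : Nat) (h2 : s + 1 < g.length)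
    (hv : validate_reflection g s = true) : (g.getD s "" == g.getD (s + 1) "") = true := by
  unfold validate_reflection at hv
  have h0 : 0 ∈ List.range (min (s + 1) (g.length - s - 1)) := by
    simp only [List.mem_range]; omega
  have := (List.all_eq_true.mp hv) 0 h0
  simpa using this

-- A's scan (prev = None) equals vScan shifted by one
theorem frGo_none (g : List String) (m : Nat) : ∀ s, g.length - 1 - s ≤ m →
    frGo g none s = ((vScan g (s + 1)).map (fun i : Nat => (i : Int))).getD 0 := by
  induction m with
  | zero =>
    intro s hm
    rw [frGo, vScan]
    rw [if_neg (by omega), if_neg (by omega)]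
    rfl
  | succ m ih =>
    intro s hm
    by_cases h : s < g.length - 1
    · rw [frGo, vScan]
      have h2 : s + 1 < g.length := by omega
      rw [if_pos h, if_pos h2, show s + 1 - 1 = s from rfl]
      by_cases hv : validate_reflection g s = true
      · have hadj := validate_first g s h2 hv
        simp only [List.getD_eq_getElem?_getD, beq_iff_eq] at hadj
        simp [hadj, hv]
      · simp only [Bool.not_eq_true] at hv
        simp only [hv, Bool.false_eq_true, if_false, ite_self]
        exact ih (s + 1) (by omega)
    · rw [frGo, vScan]
      rw [if_neg h, if_neg (by omega)]
      rfl

-- vScan only returns indices at or above its start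
theorem vScan_ge (g : List String) (m : Nat) : ∀ s i, g.length - s ≤ m →
    vScan g s = some i → s ≤ i := by
  induction m with
  | zero =>
    intro s i hm h
    rw [vScan, if_neg (by omega)] at h
    exact absurd h (by simp)
  | succ m ih =>
    intro s i hm h
    rw [vScan] at h
    by_cases hs : s < g.length
    · rw [if_pos hs] at h
      by_cases hmir : validate_reflection g (s - 1) = true
      · rw [if_pos hmir] at h
        cases h
        omega
      · rw [if_neg hmir] at h
        have := ih (s + 1) i (by omega) h
        omega
    · rw [if_neg hs] at h
      exact absurd h (by simp)

-- B's first-palindromic-line scan is vScan, read through getD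
theorem lineGo_eq_vScan (G : List String) (same : Nat → Nat → Bool)
    (hsame : ∀ a b, a < G.length → b < G.length → same a b = (G.getD a "" == G.getD b ""))
    (m : Nat) : ∀ i, 1 ≤ i → G.length - i ≤ m →
    lineGo G.length same i = (vScan G i).getD 0 := by
  induction m with
  | zero =>
    intro i _ hm
    rw [lineGo, vScan, if_neg (by omega), if_neg (by omega)]
    rfl
  | succ m ih =>
    intro i hi hm
    rw [lineGo, vScan]
    by_cases h : i < G.length
    · rw [if_pos h, if_pos h, guard_eq G same hsame i hi h]
      by_cases hv : validate_reflection G (i - 1) = true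
      · rw [if_pos hv, if_pos hv]
        rfl
      · rw [if_neg hv, if_neg hv, ih (i + 1) (by omega) (by omega)]
    · rw [if_neg h, if_neg h]
      rfl

-- widthB is the transpose's column count
theorem widthB_eq (g : List String) : widthB g = minWidth g := by
  cases g <;> rfl

theorem rotate_length (g : List String) : (rotate_matrix g).length = minWidth g := by
  simp [rotate_matrix, pyZipT]

-- rotated-matrix entry below the column count
theorem rotate_getD (g : List String) (t : Nat) (ht : t < minWidth g) :
    (rotate_matrix g).getD t "" = String.ofList ((colAt g t).reverse) := by
  unfold rotate_matrix pyZipT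
  rw [List.map_map, pvGetDMap _ _ t (by simpa using ht)]
  simp

-- B's row-major column comparison is the rotated matrix's entry comparison
theorem sameCol_eq (g : List String) (a b : Nat) (ha : a < (rotate_matrix g).length)
    (hb : b < (rotate_matrix g).length) :
    sameCol g a b = ((rotate_matrix g).getD a "" == (rotate_matrix g).getD b "") := by
  rw [rotate_length] at ha hb
  rw [rotate_getD g a ha, rotate_getD g b hb, pvOfListBeq, pvRevBeq]
  unfold colAt sameCol
  rw [pvMapBeq]

-- per-grid: A's fold body adds exactly scoreB
theorem body_eq (t : Int) (g : List String) :
    (let tr := solve g none 0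
     if tr.1 == some "COL" then t + 100 * tr.2
     else if tr.1 == some "ROW" then t + tr.2
     else t) = t + scoreB g := by
  unfold solve find_reflection scoreB
  have hbeq : ((none : Option String) == some "COL") = false := by decide
  have hbeq2 : ((none : Option String) == some "ROW") = false := by decide
  simp only [hbeq, hbeq2, if_false, Bool.false_eq_true]
  rw [frGo_none g (g.length - 1 - 0) 0 (le_refl _),
      lineGo_eq_vScan g (sameRow g) (fun a b _ _ => rfl) (g.length - 1) 1 (le_refl _) (by omega)]
  cases h1 : vScan g 1 with
  | some i =>
    have hi : 1 ≤ i := vScan_ge g (g.length - 1) 1 i (by omega) h1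
    simp [show i ≠ 0 from by omega]
  | none =>
    simp only [Option.map_none, Option.getD_none]
    rw [if_neg (show ¬ ((0 : Int) ≠ 0) from by omega)]
    rw [frGo_none (rotate_matrix g) ((rotate_matrix g).length - 1 - 0) 0 (le_refl _)]
    rw [widthB_eq, ← rotate_length g,
        lineGo_eq_vScan (rotate_matrix g) (sameCol g) (sameCol_eq g)
          ((rotate_matrix g).length - 1) 1 (le_refl _) (by omega)]
    cases h2 : vScan (rotate_matrix g) 1 with
    | some j =>
      have hj : 1 ≤ j := vScan_ge (rotate_matrix g) ((rotate_matrix g).length - 1) 1 j (by omega) h2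
      simp [show j ≠ 0 from by omega]
    | none => simp

-- A's outer fold is the sum of scoreB over the grids
theorem foldA_eq (grids : List (List String)) : ∀ t : Int,
    grids.foldl
      (fun total grid =>
        let tr := solve grid none 0
        if tr.1 == some "COL" then total + 100 * tr.2
        else if tr.1 == some "ROW" then total + tr.2
        else total) t = t + (grids.map scoreB).sum := by
  induction grids with
  | nil => intro t; simp
  | cons g grids ih =>
    intro t
    simp only [List.foldl_cons, List.map_cons, List.sum_cons]
    rw [body_eq t g, ih]
    ring

-- parse_step only appends to the pattern list: starting patterns are a prefix
theorem parse_prefix (input : List String) : ∀ (cur : List String) (pats : List (List String)),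
    input.foldl parse_step (cur, pats) =
      ((input.foldl parse_step (cur, [])).1, pats ++ (input.foldl parse_step (cur, [])).2) := by
  induction input with
  | nil => intro cur pats; simp
  | cons l input ih =>
    intro cur pats
    simp only [List.foldl_cons]
    by_cases hs : PySem.Str.strip l ≠ ""
    · rw [show parse_step (cur, pats) l = (cur ++ [PySem.Str.strip l], pats) by simp [parse_step, hs],
          show parse_step (cur, ([] : List (List String))) l = (cur ++ [PySem.Str.strip l], []) by simp [parse_step, hs]]
      exact ih (cur ++ [PySem.Str.strip l]) pats
    · rw [show parse_step (cur, pats) l = ([], pats ++ [cur]) by simp [parse_step, hs],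
          show parse_step (cur, ([] : List (List String))) l = ([], [cur]) by simp [parse_step, hs]]
      rw [ih [] (pats ++ [cur]), ih [] [cur]]
      simp

-- B's streaming fold carries (current grid, running total)
theorem stream_eq (input : List String) : ∀ (cur : List String) (t : Int),
    input.foldl
      (fun (st : List String × Int) line =>
        let s := PySem.Str.strip line
        if s ≠ "" then (st.1 ++ [s], st.2) else ([], st.2 + scoreB st.1)) (cur, t) =
      ((input.foldl parse_step (cur, [])).1,
        t + (((input.foldl parse_step (cur, [])).2).map scoreB).sum) := by
  induction input with
  | nil => intro cur t; simp
  | cons l input ih =>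
    intro cur t
    simp only [List.foldl_cons]
    by_cases hs : PySem.Str.strip l ≠ ""
    · rw [show parse_step (cur, ([] : List (List String))) l = (cur ++ [PySem.Str.strip l], []) from by simp [parse_step, hs]]
      rw [if_pos hs]
      exact ih (cur ++ [PySem.Str.strip l]) t
    · rw [show parse_step (cur, ([] : List (List String))) l = ([], [cur]) from by simp [parse_step, hs]]
      rw [if_neg hs]
      rw [ih [] (t + scoreB cur), parse_prefix input [] [cur]]
      simp
      ring

-- ===== VERDICT (by name: the statement is the Claim_ definition above) =====
theorem part_one_spec : Claim_equal_part_one := by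
  intro input _
  unfold Spec_part_one part_one part_one_alt parse_input
  rw [foldA_eq, stream_eq input [] 0]
  simp
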